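-- pv_equiv track=rewrite | github.com/Boltemis/Lotus-Chess-Engine | src/convert.py | boardstate_to_bits
-- ===== SOURCE A (Python) =====
-- def boardstate_to_bits(board):
--     arr = [('white_pawn_bits', 'P'), ('white_rook_bits', 'R'), ('white_knight_bits', 'N'),
--        ('white_bishop_bits', 'B'), ('white_queen_bits', 'Q'), ('white_king_bits', 'K'),
--        ('black_pawn_bits', 'p'), ('black_rook_bits', 'r'), ('black_knight_bits', 'n'),
--        ('black_bishop_bits', 'b'), ('black_queen_bits', 'q'), ('black_king_bits', 'k')]
--
--     bits = []
--
--     for _, piece_type in arr: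
--         bit_string = ''
--         for row in board:
--             for char in row:
--                 bit_string += '1' if char == piece_type else '0'
--         bits.append((bit_string, piece_type))
--
--     return bits
-- ===== SOURCE B (Python) =====
-- def boardstate_to_bits(board):
--     pieces = ["P", "R", "N", "B", "Q", "K", "p", "r", "n", "b", "q", "k"]
--     blank = "0" * 12
--     onehot = {p: blank[:i] + "1" + blank[i + 1:] for i, p in enumerate(pieces)}
--     cols = [onehot.get(c, blank) for row in board for c in row]
--     return [("".join(col[i] for col in cols), p) for i, p in enumerate(pieces)]
-- ===== Notes on version B (the rewrite author's own statement) =====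
-- stated objective: alternative
-- what changed: Replaces A's 12 separate full scans of the board (one per piece type) with a transpose scheme: a dict maps each piece letter to a precomputed 12-bit one-hot column string, one pass over the board collects a column per cell, and the 12 output strings are read off as the rows of that column list.
import Mathlib
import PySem

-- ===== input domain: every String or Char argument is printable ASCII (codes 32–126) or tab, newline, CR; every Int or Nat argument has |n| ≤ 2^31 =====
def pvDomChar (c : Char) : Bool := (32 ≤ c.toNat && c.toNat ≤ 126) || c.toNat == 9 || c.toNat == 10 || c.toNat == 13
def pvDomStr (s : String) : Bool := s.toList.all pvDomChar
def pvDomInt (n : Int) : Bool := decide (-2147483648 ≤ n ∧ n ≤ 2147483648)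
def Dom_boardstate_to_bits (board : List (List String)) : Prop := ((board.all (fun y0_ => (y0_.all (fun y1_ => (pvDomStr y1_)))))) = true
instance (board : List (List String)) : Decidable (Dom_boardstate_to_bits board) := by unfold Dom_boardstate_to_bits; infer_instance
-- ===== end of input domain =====

-- B replaces A's 12 per-piece board scans by one pass collecting a one-hot 12-bit column per cell and transposing (alternative structure, same cost).
-- ===== PORT A =====
-- Port of A: for each of the 12 piece types, a full scan of the board builds its bit string.
def boardstate_to_bits (board : List (List String)) : List (String × String) :=
  let arr : List (String × String) :=
    [("white_pawn_bits", "P"), ("white_rook_bits", "R"), ("white_knight_bits", "N"),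
     ("white_bishop_bits", "B"), ("white_queen_bits", "Q"), ("white_king_bits", "K"),
     ("black_pawn_bits", "p"), ("black_rook_bits", "r"), ("black_knight_bits", "n"),
     ("black_bishop_bits", "b"), ("black_queen_bits", "q"), ("black_king_bits", "k")]
  arr.foldl (fun bits pt =>
    let bit_string : String :=
      board.foldl (fun s row =>
        row.foldl (fun s c => s ++ (if c == pt.2 then "1" else "0")) s) ""
    bits ++ [(bit_string, pt.2)]) []

-- ===== PORT B =====
-- Port of B: dict piece→one-hot column string, one pass collects a column per cell, the outputs are the transpose's rows.
-- (Python's col[i] yields a 1-char string and ''.join concatenates them; ported at the char level via Str.pyGet?;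
--  the '.getD '0'' default is unreachable: every column has length 12 and 0 ≤ i < 12.)
def boardstate_to_bits_alt (board : List (List String)) : List (String × String) :=
  let pieces : List String := ["P", "R", "N", "B", "Q", "K", "p", "r", "n", "b", "q", "k"]
  let blank : String := "000000000000"
  let onehot : PySem.Dict String String :=
    (PySem.List.enumerate pieces).foldl
      (fun d ip => d.insert ip.2
        (PySem.Str.slice blank none (some ip.1) ++ "1" ++ PySem.Str.slice blank (some (ip.1 + 1)) none))
      PySem.Dict.empty
  let cols : List String := board.flatMap (fun row => row.map (fun c => onehot.getD c blank))
  (PySem.List.enumerate pieces).map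
    (fun ip => (String.ofList (cols.map (fun col => (PySem.Str.pyGet? col ip.1).getD '0')), ip.2))

-- ===== PRECONDITION & SPEC =====
def Spec_boardstate_to_bits (board : List (List String)) (out : List (String × String)) : Prop := out = boardstate_to_bits_alt board
instance (board : List (List String)) (out : List (String × String)) : Decidable (Spec_boardstate_to_bits board out) := by unfold Spec_boardstate_to_bits; infer_instance

-- ===== CLAIM =====
def Claim_equal_boardstate_to_bits : Prop := ∀ (board : List (List String)), Dom_boardstate_to_bits board → Spec_boardstate_to_bits board (boardstate_to_bits board)

-- ===== LEMMAS AND PROOFS =====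

/-- bit character for one cell against one piece letter -/
def pvCellChar (p c : String) : Char := if c == p then '1' else '0'

/-- B's concrete piece→one-hot-column dict, evaluated -/
def pvOnehot : PySem.Dict String String :=
  PySem.Dict.mk
    [("P", "100000000000"), ("R", "010000000000"), ("N", "001000000000"),
     ("B", "000100000000"), ("Q", "000010000000"), ("K", "000001000000"),
     ("p", "000000100000"), ("r", "000000010000"), ("n", "000000001000"),
     ("b", "000000000100"), ("q", "000000000010"), ("k", "000000000001")]

/-- B's per-cell transpose read: bit i of the column looked up for cell c -/
def pvCol (c : String) (i : Int) : Char :=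
  (PySem.Str.pyGet? (pvOnehot.getD c "000000000000") i).getD '0'

/-- the common closed form of both outputs, over the flattened cell list -/
def pvOut (cells : List String) : List (String × String) :=
  [(String.ofList (cells.map (pvCellChar "P")), "P"),
   (String.ofList (cells.map (pvCellChar "R")), "R"),
   (String.ofList (cells.map (pvCellChar "N")), "N"),
   (String.ofList (cells.map (pvCellChar "B")), "B"),
   (String.ofList (cells.map (pvCellChar "Q")), "Q"),
   (String.ofList (cells.map (pvCellChar "K")), "K"),
   (String.ofList (cells.map (pvCellChar "p")), "p"),
   (String.ofList (cells.map (pvCellChar "r")), "r"),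
   (String.ofList (cells.map (pvCellChar "n")), "n"),
   (String.ofList (cells.map (pvCellChar "b")), "b"),
   (String.ofList (cells.map (pvCellChar "q")), "q"),
   (String.ofList (cells.map (pvCellChar "k")), "k")]

-- A's inner row loop in closed form
lemma pvRowA (p : String) (row : List String) (s : String) :
    row.foldl (fun s c => s ++ (if c == p then "1" else "0")) s
      = s ++ String.ofList (row.map (pvCellChar p)) := by
  induction row generalizing s with
  | nil => simp
  | cons c cs ih =>
      simp only [List.foldl_cons, List.map_cons, ih]
      apply String.toList_inj.mp
      by_cases h : c == p <;> simp [pvCellChar, h]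

-- A's board loop in closed form
lemma pvBoardA (p : String) (board : List (List String)) (s : String) :
    board.foldl (fun s row =>
        row.foldl (fun s c => s ++ (if c == p then "1" else "0")) s) s
      = s ++ String.ofList (board.flatten.map (pvCellChar p)) := by
  induction board generalizing s with
  | nil => simp
  | cons r rs ih =>
      rw [List.foldl_cons, pvRowA, ih]
      apply String.toList_inj.mp
      simp

-- the same starting from the empty string
lemma pvBoardA0 (p : String) (board : List (List String)) :
    board.foldl (fun s row =>
        row.foldl (fun s c => s ++ (if c == p then "1" else "0")) s) ""
      = String.ofList (board.flatten.map (pvCellChar p)) := by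
  rw [pvBoardA]; apply String.toList_inj.mp; simp

-- A's outer loop: foldl with append-singleton is a map
lemma pvFoldMap {α β : Type} (f : α → β) (l : List α) (acc : List β) :
    l.foldl (fun bits x => bits ++ [f x]) acc = acc ++ l.map f := by
  induction l generalizing acc with
  | nil => simp
  | cons x xs ih => simp [ih]

-- A in closed form
lemma pvAclosed (board : List (List String)) :
    boardstate_to_bits board = pvOut board.flatten := by
  simp only [boardstate_to_bits, pvFoldMap, List.map_cons, List.map_nil, List.nil_append,
    pvBoardA0, pvOut]

-- B's dict lookup in closed form, on get?
set_option maxHeartbeats 1600000 in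
lemma pvGet?Onehot (c : String) : pvOnehot.get? c =
    (if "P" == c then some "100000000000" else if "R" == c then some "010000000000" else
     if "N" == c then some "001000000000" else if "B" == c then some "000100000000" else
     if "Q" == c then some "000010000000" else if "K" == c then some "000001000000" else
     if "p" == c then some "000000100000" else if "r" == c then some "000000010000" else
     if "n" == c then some "000000001000" else if "b" == c then some "000000000100" else
     if "q" == c then some "000000000010" else if "k" == c then some "000000000001" else
     none) := by
  simp only [pvOnehot, PySem.Dict.get?_mk_cons]
  rfl

-- B's dict lookup in closed form, on getD
set_option maxHeartbeats 1600000 in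
lemma pvGetOnehot (c : String) : pvOnehot.getD c "000000000000" =
    (if "P" == c then "100000000000" else if "R" == c then "010000000000" else
     if "N" == c then "001000000000" else if "B" == c then "000100000000" else
     if "Q" == c then "000010000000" else if "K" == c then "000001000000" else
     if "p" == c then "000000100000" else if "r" == c then "000000010000" else
     if "n" == c then "000000001000" else if "b" == c then "000000000100" else
     if "q" == c then "000000000010" else if "k" == c then "000000000001" else
     "000000000000") := by
  simp only [PySem.Dict.getD, pvGet?Onehot,
    apply_ite (fun o : Option String => o.getD "000000000000"), Option.getD_some, Option.getD_none]

-- the 12 bits of a cell's looked-up column are exactly A's per-cell bits, for every cell value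
set_option maxHeartbeats 2000000 in
lemma pvAllChars (c : String) :
    pvCol c 0 = pvCellChar "P" c ∧ pvCol c 1 = pvCellChar "R" c ∧
    pvCol c 2 = pvCellChar "N" c ∧ pvCol c 3 = pvCellChar "B" c ∧
    pvCol c 4 = pvCellChar "Q" c ∧ pvCol c 5 = pvCellChar "K" c ∧
    pvCol c 6 = pvCellChar "p" c ∧ pvCol c 7 = pvCellChar "r" c ∧
    pvCol c 8 = pvCellChar "n" c ∧ pvCol c 9 = pvCellChar "b" c ∧
    pvCol c 10 = pvCellChar "q" c ∧ pvCol c 11 = pvCellChar "k" c := by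
  by_cases h1 : c = "P"; · subst h1; decide
  by_cases h2 : c = "R"; · subst h2; decide
  by_cases h3 : c = "N"; · subst h3; decide
  by_cases h4 : c = "B"; · subst h4; decide
  by_cases h5 : c = "Q"; · subst h5; decide
  by_cases h6 : c = "K"; · subst h6; decide
  by_cases h7 : c = "p"; · subst h7; decide
  by_cases h8 : c = "r"; · subst h8; decide
  by_cases h9 : c = "n"; · subst h9; decide
  by_cases h10 : c = "b"; · subst h10; decide
  by_cases h11 : c = "q"; · subst h11; decide
  by_cases h12 : c = "k"; · subst h12; decide
  have hnone : pvOnehot.getD c "000000000000" = "000000000000" := by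
    rw [pvGetOnehot]
    simp [beq_iff_eq, Ne.symm h1, Ne.symm h2, Ne.symm h3, Ne.symm h4, Ne.symm h5, Ne.symm h6,
      Ne.symm h7, Ne.symm h8, Ne.symm h9, Ne.symm h10, Ne.symm h11, Ne.symm h12]
  simp only [pvCol, hnone, pvCellChar]
  refine ⟨?_, ?_, ?_, ?_, ?_, ?_, ?_, ?_, ?_, ?_, ?_, ?_⟩ <;>
    simp [h1, h2, h3, h4, h5, h6, h7, h8, h9, h10, h11, h12]

-- a comprehension over nested rows is a map over the flattened cells
lemma pvFlatMap {α β : Type} (g : α → β) (board : List (List α)) :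
    board.flatMap (fun row => row.map g) = board.flatten.map g := by
  induction board with
  | nil => rfl
  | cons r rs ih => simp [ih]

-- B in closed form
set_option maxHeartbeats 2000000 in
lemma pvBclosed (board : List (List String)) :
    boardstate_to_bits_alt board = pvOut board.flatten := by
  simp only [boardstate_to_bits_alt]
  rw [show (PySem.List.enumerate
      (["P", "R", "N", "B", "Q", "K", "p", "r", "n", "b", "q", "k"] : List String)).foldl
      (fun d ip => d.insert ip.2
        (PySem.Str.slice "000000000000" none (some ip.1) ++ "1"
          ++ PySem.Str.slice "000000000000" (some (ip.1 + 1)) none))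
      PySem.Dict.empty = pvOnehot from by decide]
  rw [pvFlatMap]
  simp only [PySem.List.enumerate_cons, PySem.List.enumerate_nil, List.map_cons, List.map_nil,
    List.map_map, Function.comp_def, pvOut]
  norm_num
  refine ⟨?_, ?_, ?_, ?_, ?_, ?_, ?_, ?_, ?_, ?_, ?_, ?_⟩ <;>
    refine congrArg String.ofList (congrArg List.flatten
      (List.map_congr_left fun row _ => List.map_congr_left fun c _ => ?_))
  · simpa [pvCol] using (pvAllChars c).1
  · simpa [pvCol] using (pvAllChars c).2.1
  · simpa [pvCol] using (pvAllChars c).2.2.1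
  · simpa [pvCol] using (pvAllChars c).2.2.2.1
  · simpa [pvCol] using (pvAllChars c).2.2.2.2.1
  · simpa [pvCol] using (pvAllChars c).2.2.2.2.2.1
  · simpa [pvCol] using (pvAllChars c).2.2.2.2.2.2.1
  · simpa [pvCol] using (pvAllChars c).2.2.2.2.2.2.2.1
  · simpa [pvCol] using (pvAllChars c).2.2.2.2.2.2.2.2.1
  · simpa [pvCol] using (pvAllChars c).2.2.2.2.2.2.2.2.2.1
  · simpa [pvCol] using (pvAllChars c).2.2.2.2.2.2.2.2.2.2.1
  · simpa [pvCol] using (pvAllChars c).2.2.2.2.2.2.2.2.2.2.2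

-- ===== VERDICT (by name: the statement is the Claim_ definition above) =====
theorem boardstate_to_bits_spec : Claim_equal_boardstate_to_bits := by
  intro board _
  unfold Spec_boardstate_to_bits
  rw [pvAclosed, pvBclosed]
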